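-- pv_equiv track=rewrite | github.com/mmadraimov92/codingame | puzzles/very_hard/bulls_and_cows/solution.py | is_rule_applicable
-- ===== SOURCE A (Python) =====
-- def is_rule_applicable(source, guess, bulls, cows):
--     true_bulls = 0
--     true_cows = 0
--     source_bulls = list(source)
--     guess_bulls = list(guess)
--     source_cows = list(source)
--     guess_cows = list(guess)
--     for index, char in enumerate(source_bulls):
--         if char == guess_bulls[index]:
--             true_bulls += 1
--             source_cows.pop(index - true_bulls + 1)
--             guess_cows.pop(index - true_bulls + 1)
--     if true_bulls != bulls:
--         return False
--
--     for char in source_cows: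
--         if char in guess_cows:
--             true_cows += 1
--
--     if true_cows != cows:
--         return False
--
--     return True
-- ===== SOURCE B (Python) =====
-- def is_rule_applicable(source, guess, bulls, cows):
--     bull_pos = {i for i, ch in enumerate(source) if ch == guess[i]}
--     if len(bull_pos) != bulls:
--         return False
--     guess_rest = {guess[i] for i in range(len(guess)) if i not in bull_pos}
--     counts = {}
--     for i in range(len(source)):
--         if i not in bull_pos:
--             counts[source[i]] = counts.get(source[i], 0) + 1
--     true_cows = sum(c for ch, c in counts.items() if ch in guess_rest)
--     return true_cows == cows
-- ===== Notes on version B (the rewrite author's own statement) =====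
-- stated objective: faster
-- what changed: Replaces A's incremental pop-from-copies bookkeeping and per-character linear membership scan with a bull-position set plus a frequency table of remaining source characters, summing counts over distinct characters present in the remaining-guess set.
import Mathlib
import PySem

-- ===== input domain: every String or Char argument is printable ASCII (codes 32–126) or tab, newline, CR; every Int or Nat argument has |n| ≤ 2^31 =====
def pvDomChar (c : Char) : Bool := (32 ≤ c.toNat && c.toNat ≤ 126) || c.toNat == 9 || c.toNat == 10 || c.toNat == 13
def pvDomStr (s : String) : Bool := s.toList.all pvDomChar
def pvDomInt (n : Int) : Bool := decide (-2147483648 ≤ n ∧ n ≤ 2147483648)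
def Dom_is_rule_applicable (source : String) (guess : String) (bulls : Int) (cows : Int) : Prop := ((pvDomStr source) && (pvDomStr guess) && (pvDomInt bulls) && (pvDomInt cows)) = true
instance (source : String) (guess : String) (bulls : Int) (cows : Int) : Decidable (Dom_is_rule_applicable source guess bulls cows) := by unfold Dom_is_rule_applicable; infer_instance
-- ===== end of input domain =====

-- B replaces A's pop-from-copies bookkeeping and per-character inner membership scan by a
-- bull-position set plus a frequency table of the remaining source characters (measured
-- faster in a timing run; A's inner scans are quadratic).

-- ===== PORT A =====
-- the bulls loop of A: state (true_bulls, source_cows, guess_cows); none = IndexError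
def pvA_bulls : List (Int × Char) → List Char → Int → List Char → List Char → Option (Int × List Char × List Char)
  | [], _, tb, sc, gc => some (tb, sc, gc)
  | (i, ch) :: rest, gb, tb, sc, gc =>
    match PySem.List.pyGet? gb i with
    | none => none
    | some gch =>
      if ch == gch then
        match PySem.List.pop? sc (i - (tb + 1) + 1), PySem.List.pop? gc (i - (tb + 1) + 1) with
        | some (_, sc'), some (_, gc') => pvA_bulls rest gb (tb + 1) sc' gc'
        | _, _ => none
      else pvA_bulls rest gb tb sc gc

def is_rule_applicable (source : String) (guess : String) (bulls : Int) (cows : Int) : Bool :=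
  let source_bulls := source.toList
  let guess_bulls := guess.toList
  match pvA_bulls (PySem.List.enumerate source_bulls 0) guess_bulls 0 source.toList guess.toList with
  | none => false   -- Python raises IndexError here (guess shorter than source); outside Pre_
  | some (true_bulls, source_cows, guess_cows) =>
    if true_bulls ≠ bulls then false
    else
      let true_cows : Int :=
        source_cows.foldl (fun acc ch => if guess_cows.contains ch then acc + 1 else acc) 0
      if true_cows ≠ cows then false else true

-- ===== PORT B =====
-- bull_pos = {i for i, ch in enumerate(source) if ch == guess[i]}; none = IndexError
def pvB_bulls : List (Int × Char) → List Char → PySem.Set Int → Option (PySem.Set Int)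
  | [], _, S => some S
  | (i, ch) :: rest, g, S =>
    match PySem.List.pyGet? g i with
    | none => none
    | some gch => pvB_bulls rest g (if ch == gch then PySem.Set.add S i else S)

def is_rule_applicable_alt (source : String) (guess : String) (bulls : Int) (cows : Int) : Bool :=
  let s := source.toList
  let g := guess.toList
  match pvB_bulls (PySem.List.enumerate s 0) g PySem.Set.empty with
  | none => false   -- IndexError, outside Pre_
  | some bull_pos =>
    if PySem.Set.len bull_pos ≠ bulls then false
    else
      let guess_rest : PySem.Set Char :=
        PySem.Set.ofList (((PySem.List.pyRange 0 (g.length : Int)).filter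
          (fun i => !(PySem.Set.contains bull_pos i))).map (fun i => PySem.List.pyGetD g i ' '))
      let counts : PySem.Dict Char Int :=
        (PySem.List.pyRange 0 (s.length : Int)).foldl
          (fun d i => if !(PySem.Set.contains bull_pos i)
                      then PySem.Dict.modify d (PySem.List.pyGetD s i ' ') 0 (· + 1)
                      else d)
          PySem.Dict.empty
      let true_cows : Int :=
        (PySem.Dict.items counts).foldl
          (fun acc p => if PySem.Set.contains guess_rest p.1 then acc + p.2 else acc) 0
      decide (true_cows = cows)

-- ===== PRECONDITION & SPEC =====
-- Pre_ excludes exactly the inputs where guess is shorter than source: there A (and B alike)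
-- raises IndexError at guess[len(guess)].
def Pre_is_rule_applicable (source : String) (guess : String) (bulls : Int) (cows : Int) : Prop :=
  source.toList.length ≤ guess.toList.length
instance (source : String) (guess : String) (bulls : Int) (cows : Int) : Decidable (Pre_is_rule_applicable source guess bulls cows) := by unfold Pre_is_rule_applicable; infer_instance

def pvWitness_is_rule_applicable : String × String × Int × Int := ("abcd", "adcb", 2, 2)

def Spec_is_rule_applicable (source : String) (guess : String) (bulls : Int) (cows : Int) (out : Bool) : Prop := out = is_rule_applicable_alt source guess bulls cows
instance (source : String) (guess : String) (bulls : Int) (cows : Int) (out : Bool) : Decidable (Spec_is_rule_applicable source guess bulls cows out) := by unfold Spec_is_rule_applicable; infer_instance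

-- ===== CLAIM (what is proved, stated in full; the proofs are below) =====
def Claim_equal_is_rule_applicable : Prop := ∀ (source : String) (guess : String) (bulls : Int) (cows : Int), Dom_is_rule_applicable source guess bulls cows → Pre_is_rule_applicable source guess bulls cows → Spec_is_rule_applicable source guess bulls cows (is_rule_applicable source guess bulls cows)

-- ===== LEMMAS AND PROOFS =====

-- reference functions: bull count, remaining (non-bull) source chars, remaining guess chars
def pvBullsN : List Char → List Char → Nat
  | a :: s, b :: g => (if a == b then 1 else 0) + pvBullsN s g
  | _, _ => 0

def pvNbS : List Char → List Char → List Char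
  | a :: s, b :: g => if a == b then pvNbS s g else a :: pvNbS s g
  | [], _ => []
  | s, [] => s

def pvNbG : List Char → List Char → List Char
  | a :: s, b :: g => if a == b then pvNbG s g else b :: pvNbG s g
  | [], g => g
  | _, [] => []

def pvBullIdx : List Char → List Char → Int → List Int
  | a :: s, b :: g, k => if a == b then k :: pvBullIdx s g (k + 1) else pvBullIdx s g (k + 1)
  | _, _, _ => []

theorem pvBullIdx_lb : ∀ (s g : List Char) (k : Int), ∀ i ∈ pvBullIdx s g k, k ≤ i := by
  intro s
  induction s with
  | nil => intro g k i hi; simp [pvBullIdx] at hi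
  | cons a s ih =>
    intro g k i hi
    cases g with
    | nil => simp [pvBullIdx] at hi
    | cons b g =>
      simp only [pvBullIdx] at hi
      split at hi
      · rcases List.mem_cons.mp hi with h | h
        · omega
        · have := ih g (k + 1) i h; omega
      · have := ih g (k + 1) i hi; omega

theorem pvBullIdx_length : ∀ (s g : List Char) (k : Int),
    (pvBullIdx s g k).length = pvBullsN s g := by
  intro s
  induction s with
  | nil => intro g k; cases g <;> simp [pvBullIdx, pvBullsN]
  | cons a s ih =>
    intro g k
    cases g with
    | nil => simp [pvBullIdx, pvBullsN]
    | cons b g => by_cases h : a == b <;> simp [pvBullIdx, pvBullsN, h, ih] <;> omega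

theorem pvDropSucc {α : Type} (l : List α) (k : Nat) (x : α) (t : List α)
    (h : l.drop k = x :: t) : l.drop (k + 1) = t := by
  have h2 := congrArg List.tail h
  rw [List.tail_drop] at h2
  simpa using h2

theorem pvGetSome {α : Type} (l : List α) (k : Nat) (x : α) (t : List α)
    (h : l.drop k = x :: t) : l[k]? = some x := by
  have h0 : (List.drop k l)[0]? = l[k + 0]? := List.getElem?_drop
  rw [h] at h0
  simpa using h0.symm

theorem pvEraseIdx_mid (P r : List Char) (x : Char) :
    (P ++ x :: r).eraseIdx P.length = P ++ r := by
  induction P with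
  | nil => simp
  | cons p P ih => simp [List.eraseIdx, ih]

theorem pvPop_mid (P r : List Char) (x : Char) :
    PySem.List.pop? (P ++ x :: r) ((P.length : Int)) = some (x, P ++ r) := by
  have h : P.length < (P ++ x :: r).length := by simp
  rw [PySem.List.pop?_natCast (P ++ x :: r) P.length h]
  congr 1
  refine Prod.ext ?_ ?_
  · simp [List.getElem_append_right (Nat.le_refl P.length)]
  · simp [pvEraseIdx_mid]

theorem pvA_gen : ∀ (rest gtail Ps Pg gfull : List Char) (k tb : Nat),
    Ps.length + tb = k → Pg.length + tb = k → rest.length ≤ gtail.length →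
    gfull.drop k = gtail →
    pvA_bulls (PySem.List.enumerate rest (k : Int)) gfull (tb : Int) (Ps ++ rest) (Pg ++ gtail)
      = some (((tb + pvBullsN rest gtail : Nat) : Int), Ps ++ pvNbS rest gtail, Pg ++ pvNbG rest gtail) := by
  intro rest
  induction rest with
  | nil =>
    intro gtail Ps Pg gfull k tb _ _ _ _
    cases gtail <;> simp [PySem.List.enumerate, pvA_bulls, pvBullsN, pvNbS, pvNbG]
  | cons ch rest ih =>
    intro gtail Ps Pg gfull k tb hPs hPg hlen hdrop
    cases gtail with
    | nil => simp at hlen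
    | cons gh gtail =>
      have hget : gfull[(k : Nat)]? = some gh := pvGetSome gfull k gh gtail hdrop
      have hdrop' : gfull.drop (k + 1) = gtail := pvDropSucc gfull k gh gtail hdrop
      by_cases hb : ch == gh
      · have hstep : pvA_bulls (PySem.List.enumerate (ch :: rest) (k : Int)) gfull (tb : Int)
            (Ps ++ ch :: rest) (Pg ++ gh :: gtail)
            = pvA_bulls (PySem.List.enumerate rest ((k : Int) + 1)) gfull ((tb : Int) + 1)
              (Ps ++ rest) (Pg ++ gtail) := by
          rw [PySem.List.enumerate_cons]
          simp only [pvA_bulls, PySem.List.pyGet?_natCast, hget, hb, if_true]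
          rw [show (k : Int) - ((tb : Int) + 1) + 1 = ((Ps.length : Nat) : Int) by push_cast; omega]
          rw [pvPop_mid]
          rw [show ((Ps.length : Nat) : Int) = ((Pg.length : Nat) : Int) by push_cast; omega]
          rw [pvPop_mid]
        rw [hstep,
            show ((k : Int) + 1) = (((k + 1 : Nat)) : Int) by push_cast; ring,
            show ((tb : Int) + 1) = (((tb + 1 : Nat)) : Int) by push_cast; ring,
            ih gtail Ps Pg gfull (k + 1) (tb + 1) (by omega) (by omega) (by simpa using hlen) hdrop']
        simp only [pvBullsN, pvNbS, pvNbG, hb, if_true, Option.some.injEq, Prod.mk.injEq]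
        exact ⟨by push_cast; ring, trivial⟩
      · have hstep : pvA_bulls (PySem.List.enumerate (ch :: rest) (k : Int)) gfull (tb : Int)
            (Ps ++ ch :: rest) (Pg ++ gh :: gtail)
            = pvA_bulls (PySem.List.enumerate rest ((k : Int) + 1)) gfull (tb : Int)
              (Ps ++ ch :: rest) (Pg ++ gh :: gtail) := by
          rw [PySem.List.enumerate_cons]
          simp only [pvA_bulls, PySem.List.pyGet?_natCast, hget, hb]
          simp
        have e1 : Ps ++ ch :: rest = (Ps ++ [ch]) ++ rest := by simp
        have e2 : Pg ++ gh :: gtail = (Pg ++ [gh]) ++ gtail := by simp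
        rw [hstep, show ((k : Int) + 1) = (((k + 1 : Nat)) : Int) by push_cast; ring, e1, e2,
            ih gtail (Ps ++ [ch]) (Pg ++ [gh]) gfull (k + 1) tb
              (by simp; omega) (by simp; omega) (by simpa using hlen) hdrop']
        simp only [pvBullsN, pvNbS, pvNbG, hb]
        simp

theorem pvB_gen : ∀ (rest gtail gfull : List Char) (k : Nat) (S : List Int),
    rest.length ≤ gtail.length → gfull.drop k = gtail → (∀ i ∈ S, i < (k : Int)) →
    pvB_bulls (PySem.List.enumerate rest (k : Int)) gfull S
      = some (S ++ pvBullIdx rest gtail (k : Int)) := by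
  intro rest
  induction rest with
  | nil =>
    intro gtail gfull k S _ _ _
    cases gtail <;> simp [PySem.List.enumerate, pvB_bulls, pvBullIdx]
  | cons ch rest ih =>
    intro gtail gfull k S hlen hdrop hS
    cases gtail with
    | nil => simp at hlen
    | cons gh gtail =>
      have hget : gfull[(k : Nat)]? = some gh := pvGetSome gfull k gh gtail hdrop
      have hdrop' : gfull.drop (k + 1) = gtail := pvDropSucc gfull k gh gtail hdrop
      have hstep : pvB_bulls (PySem.List.enumerate (ch :: rest) (k : Int)) gfull S
          = pvB_bulls (PySem.List.enumerate rest ((k : Int) + 1)) gfull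
              (if ch == gh then PySem.Set.add S (k : Int) else S) := by
        rw [PySem.List.enumerate_cons]
        simp only [pvB_bulls, PySem.List.pyGet?_natCast, hget]
      rw [hstep]
      by_cases hb : ch == gh
      · have hadd : PySem.Set.add S (k : Int) = S ++ [(k : Int)] := by
          have hk : (k : Int) ∉ S := fun h => absurd (hS _ h) (by omega)
          simp only [PySem.Set.add, PySem.Set.contains_eq_listContains]
          rw [if_neg]
          intro hc
          exact hk (List.contains_iff_mem.mp hc)
        rw [hb]
        simp only [if_true]
        rw [hadd,
            show ((k : Int) + 1) = (((k + 1 : Nat)) : Int) by push_cast; ring,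
            ih gtail gfull (k + 1) (S ++ [(k : Int)]) (by simpa using hlen) hdrop'
              (by intro i hi
                  rcases List.mem_append.mp hi with h | h
                  · have := hS _ h; omega
                  · simp at h; omega)]
        simp [pvBullIdx, hb]
      · simp only [hb]
        rw [if_neg (by simp [hb]),
            show ((k : Int) + 1) = (((k + 1 : Nat)) : Int) by push_cast; ring,
            ih gtail gfull (k + 1) S (by simpa using hlen) hdrop'
              (by intro i hi; have := hS _ hi; omega)]
        simp [pvBullIdx, hb]

theorem pvNotContains (BP : List Int) (i : Int) (h : i ∉ BP) :
    (!(PySem.Set.contains BP i)) = true := by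
  rw [PySem.Set.contains_eq_listContains]
  cases hc : List.contains BP i
  · rfl
  · exact absurd (List.contains_iff_mem.mp hc) h

theorem pvContains (BP : List Int) (i : Int) (h : i ∈ BP) :
    (!(PySem.Set.contains BP i)) = false := by
  rw [PySem.Set.contains_eq_listContains, List.contains_iff_mem.mpr h]
  rfl

theorem pvGetDrop {α : Type} (l : List α) (k : Nat) (x : α) (t : List α) (d : α)
    (h : l.drop k = x :: t) : PySem.List.pyGetD l (k : Int) d = x := by
  rw [PySem.List.pyGetD_natCast]
  have := pvGetSome l k x t h
  simp [List.getD_eq_getElem?_getD, this]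

-- filter/map characterisation of the remaining guess characters
theorem pvE_guess : ∀ (g s gfull : List Char) (k : Nat) (BP : List Int),
    (∀ i : Int, (k : Int) ≤ i → (i ∈ BP ↔ i ∈ pvBullIdx s g (k : Int))) →
    gfull.drop k = g →
    ((PySem.List.pyRange (k : Int) (gfull.length : Int)).filter
        (fun i => !(PySem.Set.contains BP i))).map (fun i => PySem.List.pyGetD gfull i ' ')
      = pvNbG s g := by
  intro g
  induction g with
  | nil =>
    intro s gfull k BP _ hdrop
    have hk : (gfull.length : Int) ≤ (k : Int) := by
      have := List.drop_eq_nil_iff.mp hdrop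
      exact_mod_cast this
    rw [PySem.List.pyRange_one_eq_nil hk]
    cases s <;> simp [pvNbG]
  | cons gh g ih =>
    intro s gfull k BP hBP hdrop
    have hklt : k < gfull.length := by
      by_contra h
      rw [List.drop_eq_nil_iff.mpr (by omega)] at hdrop
      exact List.cons_ne_nil _ _ hdrop.symm
    have hget : PySem.List.pyGetD gfull (k : Int) ' ' = gh := pvGetDrop gfull k gh g ' ' hdrop
    have hdrop' : gfull.drop (k + 1) = g := pvDropSucc gfull k gh g hdrop
    rw [PySem.List.pyRange_one_cons (by exact_mod_cast hklt)]
    cases s with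
    | nil =>
      have hknot : (k : Int) ∉ BP := fun h => by
        have := (hBP (k : Int) le_rfl).mp h; simp [pvBullIdx] at this
      simp only [List.filter_cons, pvNotContains BP (k : Int) hknot, if_true]
      rw [List.map_cons, hget]
      rw [show ((k : Int) + 1) = (((k + 1 : Nat)) : Int) by push_cast; ring,
          ih [] gfull (k + 1) BP
            (by intro i hi
                constructor
                · intro h
                  have := (hBP i (by omega)).mp h
                  simp [pvBullIdx] at this
                · intro h; simp [pvBullIdx] at h) hdrop']
      simp [pvNbG]
    | cons sh s =>
      have hmemk : ((k : Int) ∈ BP) ↔ (sh == gh) = true := by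
        rw [hBP (k : Int) le_rfl]
        simp only [pvBullIdx]
        constructor
        · intro h
          split at h
          · assumption
          · exact absurd (pvBullIdx_lb _ _ _ _ h) (by omega)
        · intro h; simp [h]
      have hBP' : ∀ i : Int, (((k + 1 : Nat)) : Int) ≤ i →
          (i ∈ BP ↔ i ∈ pvBullIdx s g (((k + 1 : Nat)) : Int)) := by
        intro i hi
        have hi' : (k : Int) + 1 ≤ i := by push_cast at hi ⊢; omega
        rw [hBP i (by omega)]
        simp only [pvBullIdx]
        rw [show (((k + 1 : Nat)) : Int) = (k : Int) + 1 by push_cast; ring] at *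
        split
        · constructor
          · intro h
            rcases List.mem_cons.mp h with h | h
            · omega
            · exact h
          · intro h; exact List.mem_cons_of_mem _ h
        · exact Iff.rfl
      by_cases hb : sh == gh
      · simp only [List.filter_cons, pvContains BP (k : Int) (hmemk.mpr hb),
            Bool.false_eq_true, if_false]
        rw [show ((k : Int) + 1) = (((k + 1 : Nat)) : Int) by push_cast; ring,
            ih s gfull (k + 1) BP hBP' hdrop']
        simp [pvNbG, hb]
      · have hknot : (k : Int) ∉ BP := fun h => hb (hmemk.mp h)
        simp only [List.filter_cons, pvNotContains BP (k : Int) hknot, if_true]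
        rw [List.map_cons, hget]
        rw [show ((k : Int) + 1) = (((k + 1 : Nat)) : Int) by push_cast; ring,
            ih s gfull (k + 1) BP hBP' hdrop']
        simp [pvNbG, hb]

-- filter/map characterisation of the remaining source characters
theorem pvE_src : ∀ (s g sfull : List Char) (k : Nat) (BP : List Int),
    (∀ i : Int, (k : Int) ≤ i → (i ∈ BP ↔ i ∈ pvBullIdx s g (k : Int))) →
    sfull.drop k = s →
    ((PySem.List.pyRange (k : Int) (sfull.length : Int)).filter
        (fun i => !(PySem.Set.contains BP i))).map (fun i => PySem.List.pyGetD sfull i ' ')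
      = pvNbS s g := by
  intro s
  induction s with
  | nil =>
    intro g sfull k BP _ hdrop
    have hk : (sfull.length : Int) ≤ (k : Int) := by
      have := List.drop_eq_nil_iff.mp hdrop
      exact_mod_cast this
    rw [PySem.List.pyRange_one_eq_nil hk]
    cases g <;> simp [pvNbS]
  | cons sh s ih =>
    intro g sfull k BP hBP hdrop
    have hklt : k < sfull.length := by
      by_contra h
      rw [List.drop_eq_nil_iff.mpr (by omega)] at hdrop
      exact List.cons_ne_nil _ _ hdrop.symm
    have hget : PySem.List.pyGetD sfull (k : Int) ' ' = sh := pvGetDrop sfull k sh s ' ' hdrop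
    have hdrop' : sfull.drop (k + 1) = s := pvDropSucc sfull k sh s hdrop
    rw [PySem.List.pyRange_one_cons (by exact_mod_cast hklt)]
    cases g with
    | nil =>
      have hall : ∀ i : Int, (k : Int) ≤ i → i ∉ BP := by
        intro i hi h
        have := (hBP i hi).mp h
        simp [pvBullIdx] at this
      have hknot : (k : Int) ∉ BP := hall (k : Int) le_rfl
      simp only [List.filter_cons, pvNotContains BP (k : Int) hknot, if_true]
      rw [List.map_cons, hget]
      rw [show ((k : Int) + 1) = (((k + 1 : Nat)) : Int) by push_cast; ring,
          ih [] sfull (k + 1) BP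
            (by intro i hi
                constructor
                · intro h
                  exact absurd h (hall i (by push_cast at hi ⊢; omega))
                · intro h; simp [pvBullIdx] at h) hdrop']
      simp only [pvNbS]
      cases s <;> rfl
    | cons gh g =>
      have hmemk : ((k : Int) ∈ BP) ↔ (sh == gh) = true := by
        rw [hBP (k : Int) le_rfl]
        simp only [pvBullIdx]
        constructor
        · intro h
          split at h
          · assumption
          · exact absurd (pvBullIdx_lb _ _ _ _ h) (by omega)
        · intro h; simp [h]
      have hBP' : ∀ i : Int, (((k + 1 : Nat)) : Int) ≤ i →
          (i ∈ BP ↔ i ∈ pvBullIdx s g (((k + 1 : Nat)) : Int)) := by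
        intro i hi
        have hi' : (k : Int) + 1 ≤ i := by push_cast at hi ⊢; omega
        rw [hBP i (by omega)]
        simp only [pvBullIdx]
        rw [show (((k + 1 : Nat)) : Int) = (k : Int) + 1 by push_cast; ring] at *
        split
        · constructor
          · intro h
            rcases List.mem_cons.mp h with h | h
            · omega
            · exact h
          · intro h; exact List.mem_cons_of_mem _ h
        · exact Iff.rfl
      by_cases hb : sh == gh
      · simp only [List.filter_cons, pvContains BP (k : Int) (hmemk.mpr hb),
            Bool.false_eq_true, if_false]
        rw [show ((k : Int) + 1) = (((k + 1 : Nat)) : Int) by push_cast; ring,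
            ih g sfull (k + 1) BP hBP' hdrop']
        simp [pvNbS, hb]
      · have hknot : (k : Int) ∉ BP := fun h => hb (hmemk.mp h)
        simp only [List.filter_cons, pvNotContains BP (k : Int) hknot, if_true]
        rw [List.map_cons, hget]
        rw [show ((k : Int) + 1) = (((k + 1 : Nat)) : Int) by push_cast; ring,
            ih g sfull (k + 1) BP hBP' hdrop']
        simp [pvNbS, hb]

-- a fold that conditionally steps is the fold of the filtered-and-mapped list
theorem pvFoldlIf {α β γ : Type} (l : List γ) (p : γ → Bool) (f : γ → β)
    (step : α → β → α) : ∀ (init : α),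
    l.foldl (fun d i => if p i then step d (f i) else d) init
      = ((l.filter p).map f).foldl step init := by
  induction l with
  | nil => intro init; rfl
  | cons x l ih => intro init; by_cases h : p x <;> simp [List.filter_cons, h, ih]

theorem pvSumZero (x : Char) (c : Int) : ∀ (D : List Char), x ∉ D →
    (D.map (fun ch => if ch = x then c else 0)).sum = 0 := by
  intro D
  induction D with
  | nil => simp
  | cons d D ih =>
    intro h
    simp only [List.mem_cons, not_or] at h
    simp [List.map_cons, Ne.symm h.1, ih h.2]

theorem pvSumSingle (x : Char) (c : Int) : ∀ (D : List Char), D.Nodup → x ∈ D →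
    (D.map (fun ch => if ch = x then c else 0)).sum = c := by
  intro D
  induction D with
  | nil => simp
  | cons d D ih =>
    intro hnd hx
    rcases List.mem_cons.mp hx with h | h
    · subst h
      simp [pvSumZero x c D (List.nodup_cons.mp hnd).1]
    · have hne : d ≠ x := by
        intro he; subst he; exact (List.nodup_cons.mp hnd).1 h
      simp [hne, ih (List.nodup_cons.mp hnd).2 h]

theorem pvFoldAddSum {γ : Type} (t : γ → Int) : ∀ (l : List γ) (init : Int),
    l.foldl (fun acc x => acc + t x) init = init + (l.map t).sum := by
  intro l
  induction l with
  | nil => intro init; simp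
  | cons x l ih => intro init; simp [ih]; ring

theorem pvFoldCount (q : Char → Bool) : ∀ (xs D : List Char), D.Nodup → (∀ x ∈ xs, x ∈ D) →
    D.foldl (fun acc ch => if q ch then acc + (List.count ch xs : Int) else acc) 0
      = (xs.countP q : Int) := by
  have hfe : ∀ (xs : List Char),
      (fun (acc : Int) ch => if q ch then acc + (List.count ch xs : Int) else acc)
        = fun acc ch => acc + (if q ch then (List.count ch xs : Int) else 0) := by
    intro xs; funext acc ch; split <;> simp
  intro xs
  induction xs with
  | nil => intro D _ _; rw [hfe, pvFoldAddSum]; simp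
  | cons x xs ih =>
    intro D hnd hcov
    have hx : x ∈ D := hcov x (List.mem_cons_self)
    have hpt : ∀ ch : Char,
        (if q ch then (List.count ch (x :: xs) : Int) else 0)
          = (if q ch then (List.count ch xs : Int) else 0)
            + (if ch = x then (if q x then (1 : Int) else 0) else 0) := by
      intro ch
      by_cases he : ch = x
      · subst he
        by_cases hq : q ch <;> simp [hq, List.count_cons]
      · have : (ch == x) = false := beq_false_of_ne he
        by_cases hq : q ch <;> simp [hq, he, Ne.symm he, List.count_cons, this]
    rw [hfe, pvFoldAddSum]
    simp only [hpt]
    rw [PySem.List.sum_map_add_int]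
    have h1 := ih D hnd (fun y hy => hcov y (List.mem_cons_of_mem x hy))
    rw [hfe, pvFoldAddSum] at h1
    simp only [zero_add] at h1 ⊢
    rw [h1, pvSumSingle x _ D hnd hx, List.countP_cons]
    by_cases hq : q x <;> simp [hq] <;> push_cast <;> ring

theorem pvContainsOfList (xs : List Char) (c : Char) :
    PySem.Set.contains (PySem.Set.ofList xs) c = xs.contains c := by
  rw [PySem.Set.contains_eq_listContains]
  by_cases h : c ∈ xs
  · rw [List.contains_iff_mem.mpr ((PySem.Set.mem_ofList xs c).mpr h),
        List.contains_iff_mem.mpr h]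
  · cases h1 : List.contains (PySem.Set.ofList xs) c
    · cases h2 : List.contains xs c
      · rfl
      · exact absurd (List.contains_iff_mem.mp h2) h
    · exact absurd ((PySem.Set.mem_ofList xs c).mp (List.contains_iff_mem.mp h1)) h

-- ===== VERDICT (by name: the statement is the Claim_ definition above) =====
theorem is_rule_applicable_spec : Claim_equal_is_rule_applicable := by
  intro source guess bulls cows _ hpre
  unfold Spec_is_rule_applicable
  unfold Pre_is_rule_applicable at hpre
  set s := source.toList with hs
  set g := guess.toList with hg
  -- A side
  have haA : pvA_bulls (PySem.List.enumerate s 0) g 0 s g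
      = some ((pvBullsN s g : Int), pvNbS s g, pvNbG s g) := by
    have := pvA_gen s g [] [] g 0 0 rfl rfl hpre (by simp)
    simpa using this
  have haB : pvB_bulls (PySem.List.enumerate s 0) g PySem.Set.empty
      = some (pvBullIdx s g 0) := by
    have := pvB_gen s g g 0 PySem.Set.empty hpre (by simp)
      (by intro i hi; simp [PySem.Set.empty] at hi)
    simpa [PySem.Set.empty] using this
  rw [is_rule_applicable, is_rule_applicable_alt]
  simp only [← hs, ← hg, haA, haB]
  -- reduce B's pieces
  have hlen : PySem.Set.len (pvBullIdx s g 0) = (pvBullsN s g : Int) := by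
    simp [PySem.Set.len, pvBullIdx_length]
  have hgr : ((PySem.List.pyRange 0 (g.length : Int)).filter
        (fun i => !(PySem.Set.contains (pvBullIdx s g 0) i))).map
          (fun i => PySem.List.pyGetD g i ' ') = pvNbG s g := by
    have := pvE_guess g s g 0 (pvBullIdx s g 0) (by intro i _; exact Iff.rfl) (by simp)
    simpa using this
  have hsr : ((PySem.List.pyRange 0 (s.length : Int)).filter
        (fun i => !(PySem.Set.contains (pvBullIdx s g 0) i))).map
          (fun i => PySem.List.pyGetD s i ' ') = pvNbS s g := by
    have := pvE_src s g s 0 (pvBullIdx s g 0) (by intro i _; exact Iff.rfl) (by simp)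
    simpa using this
  have hcounts : (PySem.List.pyRange 0 (s.length : Int)).foldl
        (fun d i => if !(PySem.Set.contains (pvBullIdx s g 0) i)
                    then PySem.Dict.modify d (PySem.List.pyGetD s i ' ') 0 (· + 1)
                    else d) PySem.Dict.empty
      = PySem.Dict.counter (pvNbS s g) := by
    rw [pvFoldlIf (PySem.List.pyRange 0 (s.length : Int))
          (fun i => !(PySem.Set.contains (pvBullIdx s g 0) i))
          (fun i => PySem.List.pyGetD s i ' ')
          (fun d c => PySem.Dict.modify d c 0 (· + 1)) PySem.Dict.empty,
        hsr, PySem.Dict.counter_eq_foldl]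
  have htc : (PySem.Dict.items (PySem.Dict.counter (pvNbS s g))).foldl
        (fun acc p => if PySem.Set.contains (PySem.Set.ofList (pvNbG s g)) p.1
                      then acc + p.2 else acc) 0
      = ((pvNbS s g).countP (fun ch => (pvNbG s g).contains ch) : Int) := by
    rw [PySem.Dict.items_counter, List.foldl_map]
    simp only [pvContainsOfList]
    exact pvFoldCount (fun ch => (pvNbG s g).contains ch) (pvNbS s g)
      (PySem.Set.ofList (pvNbS s g)) (PySem.Set.nodup_ofList _)
      (fun x hx => (PySem.Set.mem_ofList _ _).mpr hx)
  rw [hlen, hgr, hcounts, htc]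
  -- A's cow fold
  rw [PySem.List.foldl_if_add_one (fun ch => (pvNbG s g).contains ch) (pvNbS s g) 0]
  simp only [zero_add]
  -- final shape
  by_cases h1 : (pvBullsN s g : Int) = bulls
  · by_cases h2 : ((pvNbS s g).countP (fun ch => (pvNbG s g).contains ch) : Int) = cows <;>
      simp [h1, h2]
  · simp [h1]
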